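-- pv_equiv track=rewrite | github.com/VNOpenAI/Algorithm | day2/review.py | check
-- ===== SOURCE A (Python) =====
-- a = ["a", "b", "c", "b", "c", "a", "b", "c", "b"]
--
-- def check(arr, l):
--     c = {}
--     for i in range(len(a)-l+1):
--         s = '_'.join(a[i:i+l])
--         if s not in c:
--             c[s] = i
--         else:
--             if i-c[s]>= l:
--                 return [l, i, c[s]]
--     return [-1,-1,-1]
-- ===== SOURCE B (Python) =====
-- a = ["a", "b", "c", "b", "c", "a", "b", "c", "b"]
--
-- def check(arr, l):
--     # Note: like the original, this reads the module-level list `a`, not `arr`.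
--     for i in range(len(a) - l + 1):
--         w = a[i:i+l]
--         for j in range(i):          # first earlier window equal to the current one
--             if a[j:j+l] == w:
--                 if i - j >= l:
--                     return [l, i, j]
--                 break
--     return [-1, -1, -1]
-- ===== Notes on version B (the rewrite author's own statement) =====
-- stated objective: simpler
-- what changed: B drops A's dict of joined-window first occurrences and instead, for each window start i, scans j=0..i-1 directly for the first earlier equal window (breaking at the first match), which reproduces the dict's first-occurrence semantics over the fixed module-level list a.
import Mathlib
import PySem

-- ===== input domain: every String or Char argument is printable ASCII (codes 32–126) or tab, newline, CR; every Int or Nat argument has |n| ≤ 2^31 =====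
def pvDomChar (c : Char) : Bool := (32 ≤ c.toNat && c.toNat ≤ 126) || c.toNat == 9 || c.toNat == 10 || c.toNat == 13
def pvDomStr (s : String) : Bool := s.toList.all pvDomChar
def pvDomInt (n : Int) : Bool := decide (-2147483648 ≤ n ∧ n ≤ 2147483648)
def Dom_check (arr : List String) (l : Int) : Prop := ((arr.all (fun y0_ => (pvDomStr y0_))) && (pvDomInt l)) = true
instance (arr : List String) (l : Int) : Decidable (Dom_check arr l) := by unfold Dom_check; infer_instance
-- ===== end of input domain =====

-- B replaces A's dict of first occurrences by a nested first-match scan (simpler, no auxiliary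
-- dict); both, like the Python originals, read the fixed module-level list `a` and ignore `arr`.

-- the module-level list `a`
def aF : List String := ["a", "b", "c", "b", "c", "a", "b", "c", "b"]

-- ===== PORT A =====
-- the `for i in range(len(a)-l+1)` loop with early return, as fuel recursion over the range length
def checkGo (l : Int) (c : PySem.Dict String Int) (i : Int) : Nat → List Int
  | 0 => [-1, -1, -1]
  | n + 1 =>
    let s := PySem.Str.join "_" (PySem.List.slice aF (some i) (some (i + l)))
    match (PySem.Dict.get? c s : Option Int) with
    | none => checkGo l (PySem.Dict.insert c s i) (i + 1) n
    | some v => if i - v ≥ l then [l, i, v] else checkGo l c (i + 1) n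

def check (arr : List String) (l : Int) : List Int :=
  checkGo l PySem.Dict.empty 0 (10 - l).toNat

-- ===== PORT B =====
-- inner `for j in range(i)` with break at the first earlier equal window
def altInner (l : Int) (i : Int) (w : List String) (j : Int) : Nat → Option (List Int)
  | 0 => none
  | n + 1 =>
    if PySem.List.slice aF (some j) (some (j + l)) = w then
      if i - j ≥ l then some [l, i, j] else none   -- break
    else altInner l i w (j + 1) n

def altOuter (l : Int) (i : Int) : Nat → List Int
  | 0 => [-1, -1, -1]
  | n + 1 =>
    let w := PySem.List.slice aF (some i) (some (i + l))
    match altInner l i w 0 i.toNat with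
    | some r => r
    | none => altOuter l (i + 1) n

def check_alt (arr : List String) (l : Int) : List Int :=
  altOuter l 0 (10 - l).toNat

-- ===== PRECONDITION & SPEC =====
def Spec_check (arr : List String) (l : Int) (out : List Int) : Prop := out = check_alt arr l
instance (arr : List String) (l : Int) (out : List Int) : Decidable (Spec_check arr l out) := by unfold Spec_check; infer_instance

-- ===== CLAIM (what is proved, stated in full; the proofs are below) =====
def Claim_equal_check : Prop := ∀ (arr : List String) (l : Int), Dom_check arr l → Spec_check arr l (check arr l)

-- ===== LEMMAS AND PROOFS =====

-- for l ≤ -10 both windows a[0:l] and a[1:1+l] are empty, so both sides return [l, 1, 0]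
theorem slice_empty_of_le (a b : Int) (hb : b ≤ 0) (hab : b + 9 ≤ a) :
    PySem.List.slice aF (some a) (some b) = [] := by
  have h : PySem.List.clampIdx aF.length b ≤ PySem.List.clampIdx aF.length a := by
    simp only [PySem.List.clampIdx, aF, List.length]
    split_ifs <;> omega
  simp only [PySem.List.slice]
  rw [Nat.sub_eq_zero_of_le h, List.take_zero]

theorem lemma_low (l : Int) (h : l ≤ -10) : check [] l = check_alt [] l := by
  obtain ⟨n, hn⟩ : ∃ n, (10 - l).toNat = n + 2 := ⟨(10 - l).toNat - 2, by omega⟩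
  have e0 : PySem.List.slice aF none (some l) = [] := by
    rw [← PySem.List.slice_zero_start]
    simpa using slice_empty_of_le 0 l (by omega) (by omega)
  have e1 : PySem.List.slice aF (some 1) (some (1 + l)) = [] :=
    slice_empty_of_le _ _ (by omega) (by omega)
  have hge : l ≤ 1 := by omega
  simp [check, check_alt, hn, checkGo, altOuter, altInner, e0, e1, hge,
    PySem.Dict.get?, PySem.Dict.insert, PySem.Dict.empty, PySem.Str.join]

theorem lemma_high (l : Int) (h : 10 ≤ l) : check [] l = check_alt [] l := by
  have h0 : (10 - l).toNat = 0 := by omega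
  simp [check, check_alt, h0, checkGo, altOuter]

theorem arr_irrel_a (arr : List String) (l : Int) : check arr l = check [] l := rfl
theorem arr_irrel_b (arr : List String) (l : Int) : check_alt arr l = check_alt [] l := rfl

-- ===== VERDICT (by name: the statement is the Claim_ definition above) =====
theorem check_spec : Claim_equal_check := by
  intro arr l _
  show check arr l = check_alt arr l
  rw [arr_irrel_a, arr_irrel_b]
  by_cases h : l ≤ -10
  · exact lemma_low l h
  by_cases h2 : 10 ≤ l
  · exact lemma_high l h2
  have hlo : -9 ≤ l := by omega
  have hhi : l ≤ 9 := by omega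
  interval_cases l <;> decide
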